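-- pv_equiv track=rewrite | github.com/YT-AleX-1337/MMS | mms.py | row_index_compare
-- ===== SOURCE A (Python) =====
-- def row_index_compare(a, b):
--     if len(a) > len(b):
--         return 1
--     if len(a) < len(b):
--         return -1
--     for i in range(len(a) - 1, -1, -1):
--         if a[i] > b[i]:
--             return 1
--         if a[i] < b[i]:
--             return -1
--     return 0
-- ===== SOURCE B (Python) =====
-- def row_index_compare(a, b):
--     if len(a) != len(b):
--         return 1 if len(a) > len(b) else -1
--     sign = 0
--     for x, y in zip(a, b):
--         if x != y:
--             sign = 1 if x > y else -1
--     return sign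
-- ===== Notes on version B (the rewrite author's own statement) =====
-- stated objective: alternative
-- what changed: replaces A's backwards index loop with early returns by a single forward pass over zip(a, b) that keeps the sign of the last (highest-index) differing pair in an accumulator; the highest-index difference decides in both, so the results agree
import Mathlib
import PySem

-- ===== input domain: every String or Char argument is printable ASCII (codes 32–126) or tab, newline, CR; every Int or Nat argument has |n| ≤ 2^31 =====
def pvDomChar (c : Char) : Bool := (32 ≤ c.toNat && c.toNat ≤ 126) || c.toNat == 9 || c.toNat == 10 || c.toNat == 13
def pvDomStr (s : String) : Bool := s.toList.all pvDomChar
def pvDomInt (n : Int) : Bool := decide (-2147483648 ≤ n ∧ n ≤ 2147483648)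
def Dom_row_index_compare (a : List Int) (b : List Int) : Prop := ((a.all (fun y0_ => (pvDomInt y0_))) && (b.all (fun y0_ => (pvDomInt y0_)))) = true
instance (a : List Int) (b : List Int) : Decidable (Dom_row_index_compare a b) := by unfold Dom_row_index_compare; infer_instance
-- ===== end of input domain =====

-- B replaces A's backwards index loop with early returns by a single forward fold
-- over the zipped lists keeping the sign of the last differing pair; alternative, same cost.

-- ===== PORT A =====
-- the 'for i in range(len(a)-1, -1, -1)' loop with its early returns
def rowLoopA (a b : List Int) : List Int → Int
  | [] => 0
  | i :: rest =>
    if PySem.List.pyGetD a i 0 > PySem.List.pyGetD b i 0 then 1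
    else if PySem.List.pyGetD a i 0 < PySem.List.pyGetD b i 0 then -1
    else rowLoopA a b rest

def row_index_compare (a : List Int) (b : List Int) : Int :=
  if a.length > b.length then 1
  else if a.length < b.length then -1
  else rowLoopA a b (PySem.List.pyRange ((a.length : Int) - 1) (-1) (-1))

-- ===== PORT B =====
-- 'if x != y: sign = 1 if x > y else -1' inside the forward for-loop
def fwdStep (s : Int) (p : Int × Int) : Int :=
  if p.1 ≠ p.2 then (if p.1 > p.2 then 1 else -1) else s

def row_index_compare_alt (a : List Int) (b : List Int) : Int :=
  if a.length ≠ b.length then (if a.length > b.length then 1 else -1)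
  else (a.zip b).foldl fwdStep 0

-- ===== PRECONDITION & SPEC =====
def Spec_row_index_compare (a : List Int) (b : List Int) (out : Int) : Prop := out = row_index_compare_alt a b
instance (a : List Int) (b : List Int) (out : Int) : Decidable (Spec_row_index_compare a b out) := by unfold Spec_row_index_compare; infer_instance

-- ===== CLAIM (what is proved, stated in full; the proofs are below) =====
def Claim_equal_row_index_compare : Prop := ∀ (a : List Int) (b : List Int), Dom_row_index_compare a b → Spec_row_index_compare a b (row_index_compare a b)

-- ===== LEMMAS AND PROOFS =====

theorem zip_take_succ (a b : List Int) (n : Nat) (ha : n < a.length) (hb : n < b.length) :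
    (a.take (n + 1)).zip (b.take (n + 1)) =
      (a.take n).zip (b.take n) ++ [(a[n], b[n])] := by
  rw [List.take_add_one, List.take_add_one,
      List.getElem?_eq_getElem ha, List.getElem?_eq_getElem hb]
  simp only [Option.toList_some]
  rw [List.zip_append (by simp [ha.le, hb.le])]
  simp [List.zip]

theorem rowLoop_eq (a b : List Int) (n : Nat) (ha : n ≤ a.length) (hb : n ≤ b.length) :
    rowLoopA a b (PySem.List.pyRange ((n : Int) - 1) (-1) (-1)) =
      ((a.take n).zip (b.take n)).foldl fwdStep 0 := by
  induction n with
  | zero =>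
    rw [PySem.List.pyRange_neg_one_eq_nil (by norm_num)]
    simp [rowLoopA]
  | succ m ih =>
    have ham : m < a.length := by omega
    have hbm : m < b.length := by omega
    rw [show ((m + 1 : Nat) : Int) - 1 = (m : Int) by push_cast; ring,
        PySem.List.pyRange_neg_one_cons (by omega : (-1 : Int) < (m : Int))]
    rw [zip_take_succ a b m ham hbm, List.foldl_append]
    have hga : PySem.List.pyGetD a (m : Int) 0 = a[m] := by
      rw [PySem.List.pyGetD_natCast]; exact List.getD_eq_getElem a 0 ham
    have hgb : PySem.List.pyGetD b (m : Int) 0 = b[m] := by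
      rw [PySem.List.pyGetD_natCast]; exact List.getD_eq_getElem b 0 hbm
    simp only [rowLoopA, hga, hgb, List.foldl_cons, List.foldl_nil, fwdStep]
    rcases lt_trichotomy (a[m] : Int) b[m] with h | h | h
    · rw [if_neg (by omega), if_pos h, if_pos (by omega), if_neg (by omega)]
    · rw [if_neg (by omega), if_neg (by omega), if_neg (by omega)]
      exact ih (by omega) (by omega)
    · rw [if_pos h, if_pos (by omega), if_pos h]

-- ===== VERDICT (by name: the statement is the Claim_ definition above) =====
theorem row_index_compare_spec : Claim_equal_row_index_compare := by
  intro a b _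
  unfold Spec_row_index_compare row_index_compare row_index_compare_alt
  by_cases hgt : a.length > b.length
  · rw [if_pos hgt, if_pos (by omega), if_pos hgt]
  · rw [if_neg hgt]
    by_cases hlt : a.length < b.length
    · rw [if_pos hlt, if_pos (by omega), if_neg (by omega)]
    · have he : a.length = b.length := by omega
      rw [if_neg hlt, if_neg (by omega)]
      have := rowLoop_eq a b a.length (le_refl _) (le_of_eq he)
      simpa [List.take_of_length_le, he.symm.le] using this
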